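-- pv_equiv track=rewrite | github.com/FlashZ/homeworld-classic-online | gateway/protocol.py | _sanitize_routing_chat_text
-- ===== SOURCE A (Python) =====
-- import unicodedata
--
-- ROUTING_MAX_CHAT_CHARS = 220
--
-- def _sanitize_routing_chat_text(text: str) -> str:
--     """Strip control characters and clamp lobby chat to a safe length."""
--     cleaned: list[str] = []
--     last_was_space = False
--     for ch in text:
--         if ch in "\r\n\t":
--             ch = " "
--         if unicodedata.category(ch).startswith("C"):
--             continue
--         if ch.isspace():
--             if last_was_space:
--                 continue
--             cleaned.append(" ")
--             last_was_space = True
--             continue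
--         cleaned.append(ch)
--         last_was_space = False
--     return "".join(cleaned).strip()[:ROUTING_MAX_CHAT_CHARS]
-- ===== SOURCE B (Python) =====
-- import unicodedata
--
-- ROUTING_MAX_CHAT_CHARS = 220
--
-- def _sanitize_routing_chat_text(text: str) -> str:
--     """Strip control characters and clamp lobby chat to a safe length."""
--     intermediate = "".join(
--         ch
--         for ch in (" " if c in "\r\n\t" else c for c in text)
--         if not unicodedata.category(ch).startswith("C")
--     )
--     return " ".join(intermediate.split())[:ROUTING_MAX_CHAT_CHARS]
-- ===== Notes on version B (the rewrite author's own statement) =====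
-- stated objective: simpler
-- what changed: Replaced A's single-pass state machine (a last_was_space flag driving per-char append/skip decisions) with a two-stage pipeline: one map/filter pass that turns CR/LF/tab into spaces and drops category-C characters, then str.split joined back with single-space separators, which collapses and strips whitespace in one idiomatic step.
import Mathlib
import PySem

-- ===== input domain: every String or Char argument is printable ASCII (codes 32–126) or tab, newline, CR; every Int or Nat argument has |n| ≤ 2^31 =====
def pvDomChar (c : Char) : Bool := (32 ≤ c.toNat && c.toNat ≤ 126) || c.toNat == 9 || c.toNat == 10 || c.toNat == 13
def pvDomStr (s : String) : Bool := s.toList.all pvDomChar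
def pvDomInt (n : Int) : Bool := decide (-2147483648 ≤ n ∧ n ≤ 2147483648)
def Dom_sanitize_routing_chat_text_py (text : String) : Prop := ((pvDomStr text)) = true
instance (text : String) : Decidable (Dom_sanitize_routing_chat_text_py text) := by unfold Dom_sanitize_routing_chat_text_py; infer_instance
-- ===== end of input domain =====

-- B replaces A's one-pass boolean-state collapse loop with a pipeline: map/filter control chars, then split()/join (objective: simpler/idiomatic).


-- ===== PORT A =====
-- unicodedata.category(ch).startswith("C"): exact on ASCII (category Cc = codes 0..31 and 127); both Pythons call this library test
def pyCategoryIsC (c : Char) : Bool := c.toNat < 32 || c.toNat == 127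

-- A's loop over the string with the `last_was_space` flag, building `cleaned`
def aLoop : List Char → Bool → List Char
  | [], _ => []
  | ch0 :: rest, last =>
    let ch := if ch0 = '\r' || ch0 = '\n' || ch0 = '\t' then ' ' else ch0
    if pyCategoryIsC ch then aLoop rest last
    else if PySem.Chars.isspace ch then
      (if last then aLoop rest last else ' ' :: aLoop rest true)
    else ch :: aLoop rest false

def sanitize_routing_chat_text_py (text : String) : String :=
  String.ofList (PySem.Chars.slice (PySem.Chars.strip (aLoop text.toList false)) none (some 220))

-- ===== PORT B =====
-- B's first pass: map \r\n\t to ' ' and drop category-C characters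
def bMapped (cs : List Char) : List Char :=
  cs.filterMap (fun c =>
    let ch := if c = '\r' || c = '\n' || c = '\t' then ' ' else c
    if pyCategoryIsC ch then none else some ch)

def sanitize_routing_chat_text_py_alt (text : String) : String :=
  String.ofList (PySem.Chars.slice
    (PySem.Chars.join [' '] (PySem.Chars.split₀ (bMapped text.toList))) none (some 220))

-- ===== PRECONDITION & SPEC =====
def Spec_sanitize_routing_chat_text_py (text : String) (out : String) : Prop := out = sanitize_routing_chat_text_py_alt text
instance (text : String) (out : String) : Decidable (Spec_sanitize_routing_chat_text_py text out) := by unfold Spec_sanitize_routing_chat_text_py; infer_instance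

-- ===== CLAIM (what is proved, stated in full; the proofs are below) =====
def Claim_equal_sanitize_routing_chat_text_py : Prop := ∀ (text : String), Dom_sanitize_routing_chat_text_py text → Spec_sanitize_routing_chat_text_py text (sanitize_routing_chat_text_py text)

-- ===== LEMMAS AND PROOFS =====

-- collapse: A's whitespace-collapsing state machine, factored to act on the already mapped/filtered list
def collapse : List Char → Bool → List Char
  | [], _ => []
  | c :: r, last =>
    if PySem.Chars.isspace c then
      (if last then collapse r last else ' ' :: collapse r true)
    else c :: collapse r false

-- A's interleaved loop = collapse after B's map/filter pass
theorem aLoop_eq_collapse (cs : List Char) (last : Bool) :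
    aLoop cs last = collapse (bMapped cs) last := by
  induction cs generalizing last with
  | nil => rfl
  | cons c r ih =>
    simp only [aLoop, bMapped, List.filterMap_cons]
    by_cases h : pyCategoryIsC (if (c = '\r' ∨ c = '\n') ∨ c = '\t' then ' ' else c) = true
    · simp [h, ih, bMapped]
    · simp [h, collapse, ih, bMapped]

def notSpace (c : Char) : Bool := !PySem.Chars.isspace c

theorem collapse_true_eq (l : List Char) :
    collapse l true = collapse (l.dropWhile PySem.Chars.isspace) false := by
  induction l with
  | nil => rfl
  | cons c r ih =>
    by_cases h : PySem.Chars.isspace c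
    · simp [collapse, h, List.dropWhile, ih]
    · simp [collapse, h, List.dropWhile]

theorem collapse_word (l : List Char) :
    collapse l false = l.takeWhile notSpace ++ collapse (l.dropWhile notSpace) false := by
  induction l with
  | nil => rfl
  | cons c r ih =>
    by_cases h : PySem.Chars.isspace c
    · simp [collapse, h, List.takeWhile, List.dropWhile, notSpace]
    · simp [collapse, h, List.takeWhile, List.dropWhile, notSpace, ih]

-- W: the words of split₀, with structural equations
theorem go_nil (cur : List Char) (acc : List (List Char)) :
    PySem.Chars.split₀.go [] cur acc =
      (if cur.isEmpty then acc.reverse else (cur.reverse :: acc).reverse) := rfl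

theorem go_cons (c : Char) (r cur : List Char) (acc : List (List Char)) :
    PySem.Chars.split₀.go (c :: r) cur acc =
      (if PySem.Chars.isspace c then
        (if cur.isEmpty then PySem.Chars.split₀.go r [] acc
         else PySem.Chars.split₀.go r [] (cur.reverse :: acc))
       else PySem.Chars.split₀.go r (c :: cur) acc) := rfl

theorem split₀_go_acc (l cur : List Char) (acc : List (List Char)) :
    PySem.Chars.split₀.go l cur acc = acc.reverse ++ PySem.Chars.split₀.go l cur [] := by
  induction l generalizing cur acc with
  | nil =>
    by_cases h : cur.isEmpty <;> simp [go_nil, h]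
  | cons c r ih =>
    rw [go_cons, go_cons]
    by_cases h : PySem.Chars.isspace c
    · by_cases hc : cur.isEmpty
      · simp only [h, hc, if_true, ite_true]
        exact ih [] acc
      · simp only [h, hc, if_true, Bool.false_eq_true, ite_false, ite_true]
        rw [ih [] (cur.reverse :: acc), ih [] [cur.reverse]]
        simp
    · simp only [h, Bool.false_eq_true, ite_false]
      exact ih (c :: cur) acc

theorem split₀_go_cur (l : List Char) (cur : List Char) (hc : cur ≠ []) :
    PySem.Chars.split₀.go l cur [] =
      (cur.reverse ++ l.takeWhile notSpace) :: PySem.Chars.split₀ (l.dropWhile notSpace) := by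
  induction l generalizing cur with
  | nil =>
    simp [go_nil, List.isEmpty_iff, hc, PySem.Chars.split₀]
  | cons c r ih =>
    rw [go_cons]
    by_cases h : PySem.Chars.isspace c
    · have e2 : PySem.Chars.split₀.go (c :: r) [] [] = PySem.Chars.split₀.go r [] [] := by
        rw [go_cons]; simp [h]
      rw [if_pos h, if_neg (by simp [List.isEmpty_iff, hc])]
      rw [split₀_go_acc r [] [cur.reverse],
        List.takeWhile_cons_of_neg (by simp [notSpace, h]),
        List.dropWhile_cons_of_neg (by simp [notSpace, h])]
      simp [PySem.Chars.split₀, e2]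
    · simp only [h, Bool.false_eq_true, ite_false, List.takeWhile_cons, List.dropWhile_cons,
        notSpace, Bool.not_eq_true']
      rw [ih (c :: cur) (by simp)]
      simp [h]

theorem split₀_space_cons (c : Char) (r : List Char) (h : PySem.Chars.isspace c = true) :
    PySem.Chars.split₀ (c :: r) = PySem.Chars.split₀ r := by
  simp [PySem.Chars.split₀, go_cons, h]

theorem split₀_word_cons (c : Char) (r : List Char) (h : PySem.Chars.isspace c = false) :
    PySem.Chars.split₀ (c :: r) =
      (c :: r.takeWhile notSpace) :: PySem.Chars.split₀ (r.dropWhile notSpace) := by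
  rw [PySem.Chars.split₀, go_cons]
  simp only [h, Bool.false_eq_true, ite_false]
  rw [split₀_go_cur r [c] (by simp)]
  simp

theorem split₀_dropSpace (l : List Char) :
    PySem.Chars.split₀ (l.dropWhile PySem.Chars.isspace) = PySem.Chars.split₀ l := by
  induction l with
  | nil => rfl
  | cons c r ih =>
    by_cases h : PySem.Chars.isspace c
    · rw [List.dropWhile_cons_of_pos h, ih, split₀_space_cons c r h]
    · rw [List.dropWhile_cons_of_neg (by simp [h])]

theorem rstrip_nospace (l : List Char) (h : ∀ c ∈ l, PySem.Chars.isspace c = false) :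
    PySem.Chars.rstrip l = l := by
  have hd : List.dropWhile PySem.Chars.isspace l.reverse = l.reverse := by
    rw [List.dropWhile_eq_self_iff]
    intro hl
    have hx := h _ (List.mem_reverse.mp (List.getElem_mem hl))
    simp_all
  simp [PySem.Chars.rstrip, hd]

theorem rstrip_append (a b : List Char) :
    PySem.Chars.rstrip (a ++ b) =
      if (PySem.Chars.rstrip b).isEmpty then PySem.Chars.rstrip a else a ++ PySem.Chars.rstrip b := by
  simp only [PySem.Chars.rstrip, List.reverse_append, List.dropWhile_append]
  by_cases hb : (List.dropWhile PySem.Chars.isspace b.reverse).isEmpty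
  · simp [hb]
  · simp [hb]

theorem strip_space_cons (c : Char) (l : List Char) (h : PySem.Chars.isspace c = true) :
    PySem.Chars.strip (c :: l) = PySem.Chars.strip l := by
  simp [PySem.Chars.strip, PySem.Chars.lstrip, List.dropWhile_cons_of_pos h]

theorem strip_cons_nonspace (c : Char) (l : List Char) (h : PySem.Chars.isspace c = false) :
    PySem.Chars.strip (c :: l) = PySem.Chars.rstrip (c :: l) := by
  simp [PySem.Chars.strip, PySem.Chars.lstrip, h]

-- main lemma: strip of A's collapsed output = " ".join(split())
theorem strip_collapse (l : List Char) :
    PySem.Chars.strip (collapse l false) =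
      PySem.Chars.join [' '] (PySem.Chars.split₀ l) := by
  induction hn : l.length using Nat.strong_induction_on generalizing l with
  | _ n ih =>
  match l, hn with
  | [], _ => rfl
  | c :: r, hn =>
    by_cases h : PySem.Chars.isspace c = true
    · rw [show collapse (c :: r) false = ' ' :: collapse r true by simp [collapse, h],
        strip_space_cons _ _ (by decide), collapse_true_eq,
        split₀_space_cons c r h, ← split₀_dropSpace r]
      exact ih _ (by subst hn; simpa using Nat.lt_succ_of_le (List.length_dropWhile_le _ _)) _ rfl
    · have h' : PySem.Chars.isspace c = false := by simpa using h
      have hnt : notSpace c = true := by simp [notSpace, h']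
      have hw : ∀ x ∈ c :: r.takeWhile notSpace, PySem.Chars.isspace x = false := by
        intro x hx
        rcases List.mem_cons.mp hx with rfl | hx
        · exact h'
        · have := List.mem_takeWhile_imp hx
          simpa [notSpace] using this
      rw [collapse_word (c :: r), split₀_word_cons c r h',
        List.takeWhile_cons_of_pos hnt, List.dropWhile_cons_of_pos hnt]
      rcases hrest : r.dropWhile notSpace with _ | ⟨s, r2⟩
      · simp only [collapse, List.append_nil]
        rw [show PySem.Chars.split₀ ([] : List Char) = [] from rfl, PySem.Chars.join_singleton,
          strip_cons_nonspace _ _ h', rstrip_nospace _ hw]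
      · have hs : PySem.Chars.isspace s = true := by
          have hh := List.head?_dropWhile_not notSpace r
          rw [hrest] at hh
          simpa [notSpace] using hh
        have hcol : collapse (s :: r2) false =
            ' ' :: collapse (r2.dropWhile PySem.Chars.isspace) false := by
          simp [collapse, hs, collapse_true_eq]
        rw [hcol, split₀_space_cons s r2 hs, ← split₀_dropSpace r2]
        have hlen2 : r2.length + 1 ≤ r.length := by
          have h2 := List.length_dropWhile_le notSpace r
          rw [hrest] at h2
          simpa using h2
        rcases hr3 : r2.dropWhile PySem.Chars.isspace with _ | ⟨d, r4⟩
        · simp only [collapse]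
          rw [show PySem.Chars.split₀ ([] : List Char) = [] from rfl, PySem.Chars.join_singleton,
            show (c :: r.takeWhile notSpace) ++ [' '] = c :: (r.takeWhile notSpace ++ [' ']) by simp,
            strip_cons_nonspace _ _ h',
            show c :: (r.takeWhile notSpace ++ [' ']) = (c :: r.takeWhile notSpace) ++ [' '] by simp,
            rstrip_append]
          have hsp : PySem.Chars.rstrip [' '] = [] := by decide
          simp [hsp, rstrip_nospace _ hw]
        · have hd : PySem.Chars.isspace d = false := by
            have hh := List.head?_dropWhile_not PySem.Chars.isspace r2
            rw [hr3] at hh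
            simpa using hh
          have hlen3 : (d :: r4).length < n := by
            have h3 := List.length_dropWhile_le PySem.Chars.isspace r2
            rw [hr3] at h3
            have h4 : r.length + 1 = n := by simpa using hn
            simp only [List.length_cons] at h3 ⊢
            omega
          have hIH := ih _ hlen3 (d :: r4) rfl
          have hXd : collapse (d :: r4) false = d :: collapse r4 false := by
            simp [collapse, hd]
          have hrst : PySem.Chars.rstrip (collapse (d :: r4) false) =
              PySem.Chars.join [' '] (PySem.Chars.split₀ (d :: r4)) := by
            rw [← hIH, hXd, strip_cons_nonspace _ _ hd]
          have hne : (PySem.Chars.rstrip (collapse (d :: r4) false)).isEmpty = false := by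
            rw [hrst, split₀_word_cons d r4 hd]
            rcases PySem.Chars.split₀ (r4.dropWhile notSpace) with _ | ⟨u, us⟩
            · simp [PySem.Chars.join_singleton]
            · simp [PySem.Chars.join_cons_cons]
          rw [show (c :: r.takeWhile notSpace) ++ (' ' :: collapse (d :: r4) false)
                = c :: (r.takeWhile notSpace ++ (' ' :: collapse (d :: r4) false)) by simp,
            strip_cons_nonspace _ _ h',
            show c :: (r.takeWhile notSpace ++ (' ' :: collapse (d :: r4) false))
                = (c :: r.takeWhile notSpace) ++ ([' '] ++ collapse (d :: r4) false) by simp,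
            rstrip_append, rstrip_append, hne]
          simp only [Bool.false_eq_true, ite_false, List.cons_append, List.nil_append,
            List.isEmpty_cons]
          rw [hrst, split₀_word_cons d r4 hd, PySem.Chars.join_cons_cons]
          simp

-- ===== VERDICT (by name: the statement is the Claim_ definition above) =====
theorem sanitize_routing_chat_text_py_spec : Claim_equal_sanitize_routing_chat_text_py := by
  intro text _
  unfold Spec_sanitize_routing_chat_text_py
  unfold sanitize_routing_chat_text_py sanitize_routing_chat_text_py_alt
  rw [aLoop_eq_collapse, strip_collapse]
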